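-- pv_equiv track=rewrite | github.com/wanyu42/dreamschool | Q2.py | replace_characters
-- ===== SOURCE A (Python) =====
-- def replace_characters(input_str, k):
--     replaced_str = ''
--     last_seen = {}
--     # sliding window techniques
--     for i, char in enumerate(input_str):
--         if char in last_seen and i - last_seen[char] <= k:
--             replaced_str += '-'
--         else:
--             replaced_str += char
--         last_seen[char] = i
--     return replaced_str
-- ===== SOURCE B (Python) =====
-- def replace_characters(input_str, k):
--     # Sliding window of the last max(k,0) characters, maintained as a
--     # multiplicity counter; membership in the window (count > 0) decides '-'.
--     # The char leaving the window is read off by index instead of a queue.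
--     width = k if k > 0 else 0
--     counts = {}
--     pieces = []
--     for i, ch in enumerate(input_str):
--         pieces.append('-' if counts.get(ch, 0) > 0 else ch)
--         counts[ch] = counts.get(ch, 0) + 1
--         if i >= width:
--             old = input_str[i - width]
--             counts[old] = counts.get(old, 0) - 1
--     return ''.join(pieces)
-- ===== Notes on version B (the rewrite author's own statement) =====
-- stated objective: alternative
-- what changed: Replaces A's dict of last-seen indices (with index arithmetic per char) by an explicit sliding window: a queue of the last max(k,0) characters plus a multiplicity counter, with eviction of the oldest char once the window exceeds k; the '-' decision becomes a pure membership test.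
import Mathlib
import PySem

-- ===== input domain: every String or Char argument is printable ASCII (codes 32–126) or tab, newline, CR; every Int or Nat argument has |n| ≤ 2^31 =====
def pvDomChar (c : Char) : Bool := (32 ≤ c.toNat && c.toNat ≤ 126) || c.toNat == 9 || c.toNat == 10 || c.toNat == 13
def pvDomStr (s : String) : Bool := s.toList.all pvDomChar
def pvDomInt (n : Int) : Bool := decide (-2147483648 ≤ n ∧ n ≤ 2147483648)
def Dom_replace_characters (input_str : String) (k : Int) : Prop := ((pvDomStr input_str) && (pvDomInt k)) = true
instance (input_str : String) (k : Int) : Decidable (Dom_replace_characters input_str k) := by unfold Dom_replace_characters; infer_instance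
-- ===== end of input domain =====

-- B replaces A's dict of last-seen indices (index arithmetic per char) by a sliding-window
-- multiplicity counter over the last max(k,0) chars; same O(n) cost, alternative structure.

-- ===== PORT A =====
-- one iteration of A's loop body: decide '-' via the last-seen index, then record i
def pvAStep (k : Int) (st : String × PySem.Dict Char Int) (p : Int × Char) : String × PySem.Dict Char Int :=
  let repl :=
    match st.2.get? p.2 with
    | some j => if p.1 - j ≤ k then st.1 ++ "-" else st.1.push p.2
    | none => st.1.push p.2
  (repl, st.2.insert p.2 p.1)

def replace_characters (input_str : String) (k : Int) : String :=
  ((PySem.List.enumerate input_str.toList 0).foldl (pvAStep k) ("", PySem.Dict.empty)).1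

-- ===== PORT B =====
-- one iteration of B's loop body: the window count decides '-'; count the new char in,
-- and once i ≥ width count the char leaving the window (at index i - width) out.
-- (the index is always in range when i ≥ width ≥ 0; the 'none' arm is a totality guard)
def pvBStep (xs : List Char) (width : Int) (st : PySem.Dict Char Int × List Char) (p : Int × Char) :
    PySem.Dict Char Int × List Char :=
  let pieces := st.2 ++ [if st.1.getD p.2 0 > 0 then '-' else p.2]
  let counts := st.1.insert p.2 (st.1.getD p.2 0 + 1)
  if p.1 ≥ width then
    match PySem.List.pyGet? xs (p.1 - width) with
    | some old => (counts.insert old (counts.getD old 0 - 1), pieces)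
    | none => (counts, pieces)
  else (counts, pieces)

def replace_characters_alt (input_str : String) (k : Int) : String :=
  let width : Int := if k > 0 then k else 0
  String.ofList (((PySem.List.enumerate input_str.toList 0).foldl
    (pvBStep input_str.toList width) (PySem.Dict.empty, [])).2)

-- ===== PRECONDITION & SPEC =====
def Spec_replace_characters (input_str : String) (k : Int) (out : String) : Prop := out = replace_characters_alt input_str k
instance (input_str : String) (k : Int) (out : String) : Decidable (Spec_replace_characters input_str k out) := by unfold Spec_replace_characters; infer_instance

-- ===== CLAIM (what is proved, stated in full; the proofs are below) =====
def Claim_equal_replace_characters : Prop := ∀ (input_str : String) (k : Int), Dom_replace_characters input_str k → Spec_replace_characters input_str k (replace_characters input_str k)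

-- ===== LEMMAS AND PROOFS =====

-- index of the LAST occurrence of c in p (what A's dict records)
def pvLastOcc : List Char → Char → Option Nat
  | [], _ => none
  | x :: xs, c =>
    match pvLastOcc xs c with
    | some j => some (j + 1)
    | none => if x = c then some 0 else none

theorem pvLastOcc_snoc (p : List Char) (x c : Char) :
    pvLastOcc (p ++ [x]) c = if x = c then some p.length else pvLastOcc p c := by
  induction p with
  | nil => simp [pvLastOcc]
  | cons a t ih =>
      simp only [List.cons_append, pvLastOcc, ih]
      by_cases h : x = c
      · simp [h]
      · simp [h]

theorem pvLastOcc_lt (p : List Char) (c : Char) (j : Nat) (h : pvLastOcc p c = some j) :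
    j < p.length := by
  induction p generalizing j with
  | nil => simp [pvLastOcc] at h
  | cons a t ih =>
      simp only [pvLastOcc] at h
      cases hj : pvLastOcc t c with
      | some j0 =>
          rw [hj] at h
          have hji : j0 + 1 = j := by simpa using h
          have := ih j0 hj
          simp only [List.length_cons]
          omega
      | none =>
          rw [hj] at h
          by_cases hac : a = c
          · simp [hac] at h
            simp only [List.length_cons]
            omega
          · simp [hac] at h

theorem pvMem_iff_lastOcc_isSome (p : List Char) (c : Char) :
    c ∈ p ↔ (pvLastOcc p c).isSome := by
  induction p with
  | nil => simp [pvLastOcc]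
  | cons a t ih =>
      simp only [List.mem_cons, pvLastOcc]
      cases hj : pvLastOcc t c with
      | some j0 => simp [ih, hj]
      | none =>
          by_cases hac : a = c <;> simp [hac, ih, hj]
          exact fun h => hac h.symm

theorem pvMem_drop_iff (p : List Char) (c : Char) (m : Nat) :
    c ∈ p.drop m ↔ ∃ j, pvLastOcc p c = some j ∧ m ≤ j := by
  induction p generalizing m with
  | nil => simp [pvLastOcc]
  | cons a t ih =>
      cases m with
      | zero =>
          simp only [List.drop_zero]
          constructor
          · intro h
            have hsome := (pvMem_iff_lastOcc_isSome (a :: t) c).mp h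
            cases hj : pvLastOcc (a :: t) c with
            | some j => exact ⟨j, rfl, Nat.zero_le _⟩
            | none => rw [hj] at hsome; simp at hsome
          · intro ⟨j, hj, _⟩
            exact (pvMem_iff_lastOcc_isSome (a :: t) c).mpr (by simp [hj])
      | succ m' =>
          rw [List.drop_succ_cons, ih]
          simp only [pvLastOcc]
          cases hj : pvLastOcc t c with
          | some j0 =>
              constructor
              · intro ⟨j, hjj, hm⟩
                simp at hjj
                exact ⟨j0 + 1, rfl, by omega⟩
              · intro ⟨j, hjj, hm⟩
                simp at hjj
                exact ⟨j0, rfl, by omega⟩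
          | none =>
              constructor
              · intro ⟨j, hjj, _⟩; simp at hjj
              · intro ⟨j, hjj, hm⟩
                by_cases hac : a = c <;> simp [hac] at hjj <;> omega

-- the window-membership test equals A's "last seen within k" test
theorem pvWindow_iff (p : List Char) (c : Char) (k : Int) :
    c ∈ p.drop (p.length - k.toNat) ↔
      ∃ j, pvLastOcc p c = some j ∧ (p.length : Int) - (j : Int) ≤ k := by
  rw [pvMem_drop_iff]
  constructor
  · intro ⟨j, hj, hm⟩
    have hlt := pvLastOcc_lt p c j hj
    exact ⟨j, hj, by omega⟩
  · intro ⟨j, hj, hm⟩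
    have hlt := pvLastOcc_lt p c j hj
    exact ⟨j, hj, by omega⟩

-- the loop invariant: starting from states that agree (A's dict = last-seen map of the
-- prefix p, B's counter = the multiset of the last max(k,0) chars of p, same output so
-- far), the two folds over the remaining chars produce the same character list
theorem pvLoop_eq (k : Int) (full : List Char) (xs : List Char) (p : List Char)
    (sA : String) (dA : PySem.Dict Char Int)
    (cnt : PySem.Dict Char Int) (pieces : List Char)
    (hfull : full = p ++ xs)
    (hd : ∀ c, dA.get? c = (pvLastOcc p c).map (fun j => (j : Int)))
    (hcnt : ∀ c, cnt.getD c 0 = ((p.drop (p.length - k.toNat)).count c : Int))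
    (hs : sA.toList = pieces) :
    (((PySem.List.enumerate xs (p.length : Int)).foldl (pvAStep k) (sA, dA)).1).toList
      = ((PySem.List.enumerate xs (p.length : Int)).foldl
          (pvBStep full (if k > 0 then k else 0)) (cnt, pieces)).2 := by
  induction xs generalizing p sA dA cnt pieces with
  | nil => simpa [PySem.List.enumerate] using hs
  | cons x rest ih =>
      rw [PySem.List.enumerate_cons, List.foldl_cons, List.foldl_cons]
      set w : List Char := p.drop (p.length - k.toNat) with hw
      have hwid : (if k > 0 then k else 0) = (k.toNat : Int) := by
        by_cases hk : k > 0 <;> simp [hk] <;> omega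
      -- the two branch decisions coincide
      have hdec : (∃ j : Int, dA.get? x = some j ∧ (p.length : Int) - j ≤ k) ↔ x ∈ w := by
        rw [hw, pvWindow_iff]
        constructor
        · intro ⟨j, hj, hle⟩
          rw [hd x] at hj
          cases ho : pvLastOcc p x with
          | none => rw [ho] at hj; simp at hj
          | some j0 =>
              rw [ho] at hj; simp at hj
              exact ⟨j0, rfl, by omega⟩
        · intro ⟨j0, hj0, hle⟩
          exact ⟨(j0 : Int), by rw [hd x, hj0]; rfl, hle⟩
      have hmemw : (cnt.getD x 0 > 0) ↔ x ∈ w := by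
        rw [hcnt x]
        constructor
        · intro h
          have : 0 < w.count x := by exact_mod_cast h
          exact List.count_pos_iff.mp this
        · intro h
          have : 0 < w.count x := List.count_pos_iff.mpr h
          exact_mod_cast this
      set ch : Char := if cnt.getD x 0 > 0 then '-' else x with hch
      -- A's step: the new string's characters, and the new dict
      obtain ⟨sA', hA, hsA'⟩ :
          ∃ sA', pvAStep k (sA, dA) ((p.length : Int), x) = (sA', dA.insert x (p.length : Int))
            ∧ sA'.toList = pieces ++ [ch] := by
        refine ⟨(pvAStep k (sA, dA) ((p.length : Int), x)).1, Prod.ext rfl rfl, ?_⟩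
        unfold pvAStep
        simp only
        cases hg : dA.get? x with
        | none =>
            have hx : ¬ x ∈ w := by
              intro hx
              obtain ⟨j, hj, _⟩ := hdec.mpr hx
              rw [hg] at hj; simp at hj
            simp [hch, hmemw, hx, hs]
        | some j =>
            by_cases hle : (p.length : Int) - j ≤ k
            · have hx : x ∈ w := hdec.mp ⟨j, hg, hle⟩
              have hch' : ch = '-' := by rw [hch, if_pos (hmemw.mpr hx)]
              simp [hle, hch', hs]
            · have hx : ¬ x ∈ w := by
                intro hx
                obtain ⟨j', hj', hle'⟩ := hdec.mpr hx
                rw [hg] at hj'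
                exact hle (Option.some.inj hj' ▸ hle')
              simp [hle, hch, hmemw, hx, hs]
      rw [hA]
      -- facts about the new prefix p ++ [x]
      have hmle : p.length - k.toNat ≤ p.length := Nat.sub_le _ _
      have hwapp : w ++ [x] = (p ++ [x]).drop (p.length - k.toNat) := by
        rw [hw, List.drop_append_of_le_length hmle]
      have hfull' : full = (p ++ [x]) ++ rest := by rw [hfull]; simp
      have hd' : ∀ c, (dA.insert x (p.length : Int)).get? c
          = (pvLastOcc (p ++ [x]) c).map (fun j => (j : Int)) := by
        intro c
        rw [PySem.Dict.get?_insert, pvLastOcc_snoc]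
        by_cases hc : c = x
        · simp [hc]
        · have hxc : ¬ x = c := fun h => hc h.symm
          simp [hc, hxc, hd c]
      have hcnt1 : ∀ c, (cnt.insert x (cnt.getD x 0 + 1)).getD c 0 = ((w ++ [x]).count c : Int) := by
        intro c
        rw [PySem.Dict.getD_insert]
        by_cases hc : c = x
        · subst hc; simp [hcnt c, List.count_append]
        · simp [hc, hcnt c, List.count_append, Ne.symm hc]
      by_cases hpop : (p.length : Int) ≥ (if k > 0 then k else 0)
      · -- the window is at full width: the char at index i - width leaves it
        have hklen : k.toNat ≤ p.length := by rw [hwid] at hpop; omega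
        obtain ⟨old, tl, hwx⟩ : ∃ old tl, w ++ [x] = old :: tl :=
          List.exists_cons_of_ne_nil (by simp)
        -- the evicted char, read off the full list by index
        have hold : PySem.List.pyGet? full ((p.length : Int) - (if k > 0 then k else 0))
            = some old := by
          have hidx : (p.length : Int) - (if k > 0 then k else 0)
              = ((p.length - k.toNat : Nat) : Int) := by rw [hwid]; omega
          rw [hidx, PySem.List.pyGet?_natCast, hfull']
          rw [List.getElem?_append_left
            (by simp only [List.length_append, List.length_cons, List.length_nil]; omega)]
          have hdrop : ((p ++ [x]).drop (p.length - k.toNat))[0]? = (p ++ [x])[p.length - k.toNat]? := by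
            simp [List.getElem?_drop]
          rw [← hdrop, ← hwapp, hwx]
          rfl
        have hBs : pvBStep full (if k > 0 then k else 0) (cnt, pieces) ((p.length : Int), x)
            = ((cnt.insert x (cnt.getD x 0 + 1)).insert old
                 ((cnt.insert x (cnt.getD x 0 + 1)).getD old 0 - 1),
               pieces ++ [ch]) := by
          unfold pvBStep
          simp only [← hch]
          rw [if_pos hpop, hold]
        rw [hBs]
        have htlw : tl = (p ++ [x]).drop ((p ++ [x]).length - k.toNat) := by
          have htl : tl = (w ++ [x]).tail := by rw [hwx]; rfl
          rw [htl, hwapp, List.tail_drop]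
          congr 1
          simp only [List.length_append, List.length_cons, List.length_nil]
          omega
        have hcnt' : ∀ c, ((cnt.insert x (cnt.getD x 0 + 1)).insert old
              ((cnt.insert x (cnt.getD x 0 + 1)).getD old 0 - 1)).getD c 0
            = (((p ++ [x]).drop ((p ++ [x]).length - k.toNat)).count c : Int) := by
          intro c
          rw [← htlw, PySem.Dict.getD_insert]
          have htcnt : (w ++ [x]).count c = tl.count c + (if c = old then 1 else 0) := by
            rw [hwx, List.count_cons]
            by_cases hco : c = old
            · simp [hco]
            · simp [hco, Ne.symm]
          by_cases hco : c = old
          · rw [if_pos hco, ← hco, hcnt1 c, htcnt, if_pos hco]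
            push_cast
            ring
          · rw [if_neg hco, hcnt1 c, htcnt, if_neg hco]
            simp
        simpa using ih (p ++ [x]) sA' (dA.insert x (p.length : Int)) _ (pieces ++ [ch])
          hfull' hd' hcnt' hsA'
      · -- the window still grows: nothing leaves it
        have hklen : p.length < k.toNat := by rw [hwid] at hpop; omega
        have hBs : pvBStep full (if k > 0 then k else 0) (cnt, pieces) ((p.length : Int), x)
            = (cnt.insert x (cnt.getD x 0 + 1), pieces ++ [ch]) := by
          unfold pvBStep
          simp only [← hch]
          rw [if_neg hpop]
        rw [hBs]
        have hcnt1' : ∀ c, (cnt.insert x (cnt.getD x 0 + 1)).getD c 0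
            = (((p ++ [x]).drop ((p ++ [x]).length - k.toNat)).count c : Int) := by
          intro c
          have h01 : (p ++ [x]).length - k.toNat = p.length - k.toNat := by
            simp only [List.length_append, List.length_cons, List.length_nil]
            omega
          rw [hcnt1 c, hwapp, h01]
        simpa using ih (p ++ [x]) sA' (dA.insert x (p.length : Int)) _ (pieces ++ [ch])
          hfull' hd' hcnt1' hsA'

-- ===== VERDICT (by name: the statement is the Claim_ definition above) =====
theorem replace_characters_spec : Claim_equal_replace_characters := by
  intro input_str k _
  unfold Spec_replace_characters replace_characters replace_characters_alt
  have h := pvLoop_eq k input_str.toList input_str.toList [] "" PySem.Dict.empty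
    PySem.Dict.empty []
    (by simp)
    (by intro c; simp [pvLastOcc, PySem.Dict.get?_empty])
    (by intro c; simp [PySem.Dict.getD_empty])
    (by simp)
  simp only [List.length_nil, Nat.cast_zero] at h
  calc ((PySem.List.enumerate input_str.toList 0).foldl (pvAStep k) ("", PySem.Dict.empty)).1
      = String.ofList (((PySem.List.enumerate input_str.toList 0).foldl (pvAStep k)
          ("", PySem.Dict.empty)).1).toList := (String.ofList_toList).symm
    _ = _ := by rw [h]
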